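-- pv_equiv track=rewrite | github.com/python-daisychain/daisychain | daisy/importer.py | get_smallest_specified_module_name
-- ===== SOURCE A (Python) =====
-- def get_smallest_specified_module_name(module_name):
--     pieces = []
--     for piece in module_name.split('.'):
--         if '*' in piece:
--             if len(pieces) == 0:
--                 raise ImportError("Cannot search under all packages because of high performance implications")
--             return '.'.join(pieces)
--         pieces.append(piece)
--     return '.'.join(pieces)
-- ===== SOURCE B (Python) =====
-- def get_smallest_specified_module_name(module_name):
--     cut = -1
--     for i, ch in enumerate(module_name):
--         if ch == '*':
--             if cut == -1:
--                 raise ImportError("Cannot search under all packages because of high performance implications")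
--             return module_name[:cut]
--         if ch == '.':
--             cut = i
--     return module_name
-- ===== Notes on version B (the rewrite author's own statement) =====
-- stated objective: alternative
-- what changed: B makes a single left-to-right character scan that tracks the index of the last '.' seen and cuts the string there at the first '*', instead of splitting into dot-separated pieces, testing each piece for a wildcard and re-joining the accumulated pieces.
import Mathlib
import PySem

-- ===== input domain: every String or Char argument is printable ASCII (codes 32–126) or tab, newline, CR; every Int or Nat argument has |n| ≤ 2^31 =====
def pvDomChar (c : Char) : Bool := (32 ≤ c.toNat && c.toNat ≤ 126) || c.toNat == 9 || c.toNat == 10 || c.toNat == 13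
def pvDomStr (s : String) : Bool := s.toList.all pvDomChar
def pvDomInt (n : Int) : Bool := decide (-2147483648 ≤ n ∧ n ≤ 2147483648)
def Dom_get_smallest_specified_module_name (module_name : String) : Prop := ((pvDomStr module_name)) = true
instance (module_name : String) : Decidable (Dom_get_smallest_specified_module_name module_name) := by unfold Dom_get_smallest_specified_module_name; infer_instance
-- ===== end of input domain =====

-- B replaces A's split-into-pieces/re-join loop by a single character scan that tracks the index
-- of the last '.' seen (alternative decomposition, same cost); on the inputs where Python A raises
-- ImportError Python B raises the same error, and those inputs are excluded by Pre_.

-- ===== PORT A =====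
-- the loop "for piece in module_name.split('.')" with the accumulating list 'pieces'
def aLoop (rem : List (List Char)) (pieces : List (List Char)) : List Char :=
  match rem with
  | [] => PySem.Chars.join ['.'] pieces
  | piece :: rest =>
    if PySem.Chars.isIn ['*'] piece then
      -- when pieces = [] Python raises ImportError here (excluded by Pre_);
      -- the port returns '.'.join(pieces) = "" there
      PySem.Chars.join ['.'] pieces
    else aLoop rest (pieces ++ [piece])

def get_smallest_specified_module_name (module_name : String) : String :=
  -- module_name.split('.') with the non-empty literal separator: Chars.splitOn is the sep ≠ "" form
  String.ofList (aLoop (PySem.Chars.splitOn module_name.toList ['.']) [])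

-- ===== PORT B =====
-- "for i, ch in enumerate(module_name)" with the running last-dot index 'cut'
def bLoop (orig : List Char) (rem : List Char) (i : Int) (cut : Int) : List Char :=
  match rem with
  | [] => orig
  | c :: rest =>
    if c = '*' then
      if cut = -1 then []   -- Python raises ImportError here (excluded by Pre_)
      else PySem.Chars.slice orig none (some cut)   -- module_name[:cut]
    else bLoop orig rest (i + 1) (if c = '.' then i else cut)

def get_smallest_specified_module_name_alt (module_name : String) : String :=
  String.ofList (bLoop module_name.toList module_name.toList 0 (-1))

-- ===== PRECONDITION & SPEC =====
-- Pre_ excludes exactly the inputs on which Python A raises ImportError: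
-- those whose piece before the first '.' contains a '*' (Python B raises the same error there).
def Pre_get_smallest_specified_module_name (module_name : String) : Prop :=
  PySem.Chars.isIn ['*'] (module_name.toList.takeWhile (fun c => !(c == '.'))) = false
instance (module_name : String) : Decidable (Pre_get_smallest_specified_module_name module_name) := by unfold Pre_get_smallest_specified_module_name; infer_instance

def pvWitness_get_smallest_specified_module_name : String := "daisy.steps.*"

def Spec_get_smallest_specified_module_name (module_name : String) (out : String) : Prop := out = get_smallest_specified_module_name_alt module_name
instance (module_name : String) (out : String) : Decidable (Spec_get_smallest_specified_module_name module_name out) := by unfold Spec_get_smallest_specified_module_name; infer_instance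

-- ===== CLAIM (what is proved, stated in full; the proofs are below) =====
def Claim_equal_get_smallest_specified_module_name : Prop := ∀ (module_name : String), Dom_get_smallest_specified_module_name module_name → Pre_get_smallest_specified_module_name module_name → Spec_get_smallest_specified_module_name module_name (get_smallest_specified_module_name module_name)

-- ===== LEMMAS AND PROOFS =====

-- index of the last '.' of l, or -1 if l has none (uniform closed form)
def cutOf (l : List Char) : Int :=
  (l.length : Int) - 1 - ((l.reverse.takeWhile (fun c => !(c == '.'))).length : Int)

-- common value of both ports
def gSpec (cs : List Char) : List Char :=
  if '*' ∈ cs then cs.take (cutOf (cs.takeWhile (fun c => !(c == '*')))).toNat else cs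

lemma cutOf_nil : cutOf [] = -1 := by simp [cutOf]

lemma cutOf_no_dot {l : List Char} (h : '.' ∉ l) : cutOf l = -1 := by
  have ht : l.reverse.takeWhile (fun c => !(c == '.')) = l.reverse := by
    refine List.takeWhile_eq_self_iff.mpr ?_
    intro a ha
    have : a ≠ '.' := fun e => h (e ▸ List.mem_reverse.mp ha)
    simp [this]
  unfold cutOf
  rw [ht]
  simp

lemma dlen_lt {l : List Char} (h : '.' ∈ l) :
    (l.reverse.takeWhile (fun c => !(c == '.'))).length < l.length := by
  have hpre : l.reverse.takeWhile (fun c => !(c == '.')) <+: l.reverse :=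
    List.takeWhile_prefix _
  have hle := hpre.length_le
  rw [List.length_reverse] at hle
  rcases lt_or_eq_of_le hle with hlt | heq
  · exact hlt
  · exfalso
    have heq' : (l.reverse.takeWhile (fun c => !(c == '.'))).length = l.reverse.length := by
      rw [List.length_reverse]; exact heq
    have := List.IsPrefix.eq_of_length hpre heq'
    have hall := List.takeWhile_eq_self_iff.mp this
    have := hall '.' (List.mem_reverse.mpr h)
    simp at this

lemma cutOf_nonneg {l : List Char} (h : '.' ∈ l) : 0 ≤ cutOf l := by
  have := dlen_lt h
  unfold cutOf
  omega

lemma cutOf_append_singleton (l : List Char) (c : Char) :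
    cutOf (l ++ [c]) = if c = '.' then (l.length : Int) else cutOf l := by
  by_cases hc : c = '.'
  · subst hc
    unfold cutOf
    simp
  · unfold cutOf
    rw [List.reverse_append]
    simp only [List.reverse_singleton, List.singleton_append, List.takeWhile_cons]
    rw [if_pos (by simp [hc])]
    simp [hc]
    omega

lemma cutOf_cons (c : Char) (w : List Char) :
    cutOf (c :: w) = if '.' ∈ w then 1 + cutOf w else if c = '.' then 0 else -1 := by
  by_cases hw : '.' ∈ w
  · rw [if_pos hw]
    have hlt := dlen_lt hw
    unfold cutOf
    have hrev : (c :: w).reverse = w.reverse ++ [c] := by simp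
    rw [hrev, List.takeWhile_append]
    rw [if_neg (by rw [List.length_reverse]; omega)]
    simp
    omega
  · rw [if_neg hw]
    by_cases hc : c = '.'
    · subst hc
      rw [if_pos rfl]
      have ht : w.reverse.takeWhile (fun c => !(c == '.')) = w.reverse := by
        refine List.takeWhile_eq_self_iff.mpr ?_
        intro a ha
        have : a ≠ '.' := fun e => hw (e ▸ List.mem_reverse.mp ha)
        simp [this]
      unfold cutOf
      have hrev : ('.' :: w).reverse = w.reverse ++ ['.'] := by simp
      rw [hrev, List.takeWhile_append]
      rw [if_pos (by rw [ht, List.length_reverse])]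
      rw [List.takeWhile_cons]
      simp
    · rw [if_neg hc]
      have : '.' ∉ (c :: w) := by
        intro hmem
        rcases List.mem_cons.mp hmem with h | h
        · exact hc h.symm
        · exact hw h
      rw [cutOf_no_dot this]

-- ---- B side ----

lemma bLoop_spec : ∀ (rem pre : List Char),
    bLoop (pre ++ rem) rem (pre.length : Int) (cutOf pre) =
      if '*' ∈ rem then (pre ++ rem.takeWhile (fun c => !(c == '*'))).take (cutOf (pre ++ rem.takeWhile (fun c => !(c == '*')))).toNat ++ []
      else pre ++ rem := by
  intro rem
  induction rem with
  | nil => intro pre; simp [bLoop]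
  | cons c rest ih =>
    intro pre
    by_cases hc : c = '*'
    · subst hc
      have hmem : '*' ∈ '*' :: rest := List.mem_cons_self
      rw [if_pos hmem]
      have htw : ('*' :: rest).takeWhile (fun c => !(c == '*')) = [] := by
        simp
      rw [htw, List.append_nil, List.append_nil]
      show bLoop (pre ++ '*' :: rest) ('*' :: rest) (pre.length : Int) (cutOf pre) = _
      rw [bLoop]
      rw [if_pos rfl]
      by_cases hd : '.' ∈ pre
      · have h0 := cutOf_nonneg hd
        rw [if_neg (by omega)]
        rw [PySem.Chars.slice_eq_listSlice, PySem.List.slice_to (pre ++ '*' :: rest) h0]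
        have : (cutOf pre).toNat ≤ pre.length := by unfold cutOf at *; omega
        rw [List.take_append_of_le_length this]
      · rw [cutOf_no_dot hd, if_pos rfl]
        simp
    · show bLoop (pre ++ c :: rest) (c :: rest) (pre.length : Int) (cutOf pre) = _
      rw [bLoop]
      rw [if_neg hc]
      have harg : (if c = '.' then (pre.length : Int) else cutOf pre) = cutOf (pre ++ [c]) :=
        (cutOf_append_singleton pre c).symm
      have hlen : (pre.length : Int) + 1 = ((pre ++ [c]).length : Int) := by simp
      rw [harg, hlen]
      have hre : pre ++ c :: rest = (pre ++ [c]) ++ rest := by simp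
      rw [hre]
      rw [ih (pre ++ [c])]
      have htw : (c :: rest).takeWhile (fun c => !(c == '*')) = c :: rest.takeWhile (fun c => !(c == '*')) := by
        simp [hc]
      simp [htw, List.append_assoc, Ne.symm hc]

lemma b_eq_gSpec (cs : List Char) : bLoop cs cs 0 (-1) = gSpec cs := by
  have h := bLoop_spec cs []
  simp only [List.nil_append, List.length_nil, Nat.cast_zero, cutOf_nil, List.append_nil] at h
  unfold gSpec
  rw [h]
  by_cases hs : '*' ∈ cs
  · rw [if_pos hs, if_pos hs]
    have hp : cs.takeWhile (fun c => !(c == '*')) <+: cs := List.takeWhile_prefix _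
    obtain ⟨t, ht⟩ := hp
    have hle : (cutOf (cs.takeWhile (fun c => !(c == '*')))).toNat ≤ (cs.takeWhile (fun c => !(c == '*'))).length := by
      unfold cutOf; omega
    have htake := List.take_append_of_le_length (l₂ := t) hle
    rw [ht] at htake
    exact htake.symm
  · rw [if_neg hs, if_neg hs]

-- ---- A side ----

lemma isIn_singleton_iff (c : Char) (l : List Char) :
    PySem.Chars.isIn [c] l = true ↔ c ∈ l := by
  rw [PySem.Chars.isIn_iff_infix]
  constructor
  · intro h; exact h.subset (by simp)
  · intro h
    obtain ⟨s, t, rfl⟩ := List.append_of_mem h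
    exact ⟨s, t, by simp⟩

lemma isIn_singleton_false_iff (c : Char) (l : List Char) :
    PySem.Chars.isIn [c] l = false ↔ c ∉ l := by
  rw [← isIn_singleton_iff c l]
  cases PySem.Chars.isIn [c] l <;> simp

lemma splitOn_head (cs : List Char) :
    ∃ t, cs.splitOn '.' = (cs.takeWhile (fun c => !(c == '.'))) :: t := by
  induction cs with
  | nil => exact ⟨[], by simp [List.splitOn]⟩
  | cons c cs ih =>
    by_cases hc : c = '.'
    · subst hc
      refine ⟨cs.splitOn '.', ?_⟩
      simp [List.splitOn, List.splitOnP_cons]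
    · obtain ⟨t, ht⟩ := ih
      refine ⟨t, ?_⟩
      simp only [List.splitOn] at ht ⊢
      rw [List.splitOnP_cons, if_neg (by simp [hc]), ht]
      simp [hc]

lemma splitOn_go_spec : ∀ (fuel : Nat) (l cur : List Char) (accs : List (List Char)),
    l.length < fuel →
    PySem.Chars.splitOn.go ['.'] fuel l cur accs =
      accs.reverse ++ (l.splitOn '.').modifyHead (cur.reverse ++ ·) := by
  intro fuel
  induction fuel with
  | zero => intro l cur accs h; omega
  | succ fuel ih =>
    intro l cur accs hl
    cases l with
    | nil =>
      rw [show PySem.Chars.splitOn.go ['.'] (fuel + 1) [] cur accs = (cur.reverse :: accs).reverse from rfl]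
      simp [List.splitOn, List.splitOnP_nil]
    | cons c rest =>
      have hstep : PySem.Chars.splitOn.go ['.'] (fuel + 1) (c :: rest) cur accs =
          if ['.'].isPrefixOf (c :: rest) then
            PySem.Chars.splitOn.go ['.'] fuel (List.drop 1 (c :: rest)) [] (cur.reverse :: accs)
          else PySem.Chars.splitOn.go ['.'] fuel rest (c :: cur) accs := rfl
      rw [hstep]
      have hlen : rest.length < fuel := by simp at hl; omega
      by_cases hc : c = '.'
      · subst hc
        rw [if_pos (by simp [List.isPrefixOf])]
        simp only [List.drop_succ_cons, List.drop_zero]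
        rw [ih rest [] (cur.reverse :: accs) hlen]
        obtain ⟨t, ht⟩ := splitOn_head rest
        have hsplit : ('.' :: rest).splitOn '.' = [] :: rest.splitOn '.' := by
          simp [List.splitOn, List.splitOnP_cons]
        rw [hsplit, ht]
        simp
      · rw [if_neg (by simp [List.isPrefixOf, Ne.symm hc])]
        rw [ih rest (c :: cur) accs hlen]
        obtain ⟨t, ht⟩ := splitOn_head rest
        have hsplit : (c :: rest).splitOn '.' =
            (c :: rest.takeWhile (fun c => !(c == '.'))) :: t := by
          simp only [List.splitOn] at ht ⊢
          rw [List.splitOnP_cons, if_neg (by simp [hc]), ht]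
          simp
        rw [hsplit, ht]
        simp

lemma splitOn_eq (cs : List Char) : PySem.Chars.splitOn cs ['.'] = cs.splitOn '.' := by
  show PySem.Chars.splitOn.go ['.'] (cs.length + 1) cs [] [] = _
  rw [splitOn_go_spec (cs.length + 1) cs [] [] (by omega)]
  obtain ⟨t, ht⟩ := splitOn_head cs
  rw [ht]
  simp

lemma aLoop_spec : ∀ (rem pieces : List (List Char)),
    aLoop rem pieces =
      PySem.Chars.join ['.'] (pieces ++ rem.takeWhile (fun p => !PySem.Chars.isIn ['*'] p)) := by
  intro rem
  induction rem with
  | nil => intro pieces; simp [aLoop]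
  | cons piece rest ih =>
    intro pieces
    by_cases h : PySem.Chars.isIn ['*'] piece
    · simp [aLoop, h]
    · simp only [aLoop, h, if_false, Bool.false_eq_true]
      rw [ih, List.takeWhile_cons, if_pos (by simp [h])]
      simp

lemma tw_mem_iff : ∀ l : List Char,
    ('*' ∈ l.takeWhile (fun c => !(c == '.'))) ↔
      ('*' ∈ l ∧ '.' ∉ l.takeWhile (fun c => !(c == '*'))) := by
  intro l
  induction l with
  | nil => simp
  | cons c l ih =>
    by_cases h1 : c = '.'
    · subst h1; simp
    · by_cases h2 : c = '*'
      · subst h2; simp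
      · simp only [List.takeWhile_cons]
        rw [if_pos (by simp [h1]), if_pos (by simp [h2])]
        simp [ih, Ne.symm h2]
        tauto

lemma h_eq : ∀ cs : List Char,
    PySem.Chars.join ['.'] ((cs.splitOn '.').takeWhile (fun p => !PySem.Chars.isIn ['*'] p)) =
      gSpec cs := by
  intro cs
  induction cs with
  | nil => simp [List.splitOn, List.splitOnP_nil, gSpec, isIn_singleton_false_iff, PySem.Chars.join_singleton]
  | cons c cs ih =>
    obtain ⟨t, ht⟩ := splitOn_head cs
    by_cases hc : c = '.'
    · subst hc
      have hsplit : ('.' :: cs).splitOn '.' = [] :: cs.splitOn '.' := by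
        simp [List.splitOn, List.splitOnP_cons]
      rw [hsplit, List.takeWhile_cons,
        if_pos (by rw [(isIn_singleton_false_iff '*' []).mpr (by simp)]; rfl)]
      by_cases hp0 : '*' ∈ cs.takeWhile (fun c => !(c == '.'))
      · have hzero : (cs.splitOn '.').takeWhile (fun p => !PySem.Chars.isIn ['*'] p) = [] := by
          rw [ht, List.takeWhile_cons,
            if_neg (by rw [(isIn_singleton_iff '*' _).mpr hp0]; simp)]
        rw [hzero, PySem.Chars.join_singleton]
        have hsc : '*' ∈ cs := (List.takeWhile_sublist _).subset hp0
        have hnd : '.' ∉ cs.takeWhile (fun c => !(c == '*')) := ((tw_mem_iff cs).mp hp0).2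
        unfold gSpec
        rw [if_pos (List.mem_cons_of_mem _ hsc)]
        rw [List.takeWhile_cons, if_pos (by simp)]
        rw [cutOf_cons, if_neg hnd, if_pos rfl]
        simp
      · have hhead : ¬ (PySem.Chars.isIn ['*'] (cs.takeWhile (fun c => !(c == '.'))) = true) := by
          rw [isIn_singleton_iff]; exact hp0
        have hstep : (cs.splitOn '.').takeWhile (fun p => !PySem.Chars.isIn ['*'] p) =
            (cs.takeWhile (fun c => !(c == '.'))) :: (t.takeWhile (fun p => !PySem.Chars.isIn ['*'] p)) := by
          rw [ht, List.takeWhile_cons, if_pos (by simp [hhead])]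
        have hjoin : PySem.Chars.join ['.'] ([] :: (cs.splitOn '.').takeWhile (fun p => !PySem.Chars.isIn ['*'] p)) =
            '.' :: PySem.Chars.join ['.'] ((cs.splitOn '.').takeWhile (fun p => !PySem.Chars.isIn ['*'] p)) := by
          rw [hstep, PySem.Chars.join_cons_cons]
          simp
        rw [hjoin, ih]
        by_cases hs : '*' ∈ cs
        · have hd : '.' ∈ cs.takeWhile (fun c => !(c == '*')) := by
            by_contra hnd
            exact hp0 ((tw_mem_iff cs).mpr ⟨hs, hnd⟩)
          have h0 := cutOf_nonneg hd
          unfold gSpec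
          rw [if_pos hs, if_pos (List.mem_cons_of_mem _ hs)]
          rw [List.takeWhile_cons, if_pos (by simp)]
          rw [cutOf_cons, if_pos hd]
          have : (1 + cutOf (cs.takeWhile (fun c => !(c == '*')))).toNat =
              (cutOf (cs.takeWhile (fun c => !(c == '*')))).toNat + 1 := by omega
          rw [this, List.take_succ_cons]
        · unfold gSpec
          rw [if_neg hs, if_neg (by simp [hs])]
    · by_cases hc2 : c = '*'
      · subst hc2
        have hsplit : ('*' :: cs).splitOn '.' =
            ('*' :: cs.takeWhile (fun c => !(c == '.'))) :: t := by
          simp only [List.splitOn] at ht ⊢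
          rw [List.splitOnP_cons, if_neg (by simp), ht]
          simp
        rw [hsplit, List.takeWhile_cons,
          if_neg (by rw [(isIn_singleton_iff '*' _).mpr List.mem_cons_self]; simp)]
        rw [PySem.Chars.join_nil]
        unfold gSpec
        rw [if_pos List.mem_cons_self]
        rw [List.takeWhile_cons, if_neg (by simp)]
        rw [cutOf_nil]
        simp
      · have hsplit : (c :: cs).splitOn '.' =
            (c :: cs.takeWhile (fun c => !(c == '.'))) :: t := by
          simp only [List.splitOn] at ht ⊢
          rw [List.splitOnP_cons, if_neg (by simp [hc]), ht]
          simp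
        rw [hsplit]
        by_cases hp0 : '*' ∈ cs.takeWhile (fun c => !(c == '.'))
        · rw [List.takeWhile_cons,
            if_neg (by rw [(isIn_singleton_iff '*' _).mpr (List.mem_cons_of_mem _ hp0)]; simp)]
          rw [PySem.Chars.join_nil]
          have hsc : '*' ∈ cs := (List.takeWhile_sublist _).subset hp0
          have hnd : '.' ∉ cs.takeWhile (fun c => !(c == '*')) := ((tw_mem_iff cs).mp hp0).2
          unfold gSpec
          rw [if_pos (List.mem_cons_of_mem _ hsc)]
          rw [List.takeWhile_cons, if_pos (by simp [hc2])]
          rw [cutOf_cons, if_neg hnd, if_neg hc]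
          simp
        · have hhead : PySem.Chars.isIn ['*'] (c :: cs.takeWhile (fun c => !(c == '.'))) = false := by
            rw [isIn_singleton_false_iff]
            intro hmem
            rcases List.mem_cons.mp hmem with h | h
            · exact hc2 h.symm
            · exact hp0 h
          have hhead2 : PySem.Chars.isIn ['*'] (cs.takeWhile (fun c => !(c == '.'))) = false := by
            rw [isIn_singleton_false_iff]; exact hp0
          rw [List.takeWhile_cons, if_pos (by simp [hhead])]
          have hcons : ∀ (p : List Char) (tt : List (List Char)),
              PySem.Chars.join ['.'] ((c :: p) :: tt) = c :: PySem.Chars.join ['.'] (p :: tt) := by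
            intro p tt
            cases tt with
            | nil => rw [PySem.Chars.join_singleton, PySem.Chars.join_singleton]
            | cons q r =>
              rw [PySem.Chars.join_cons_cons, PySem.Chars.join_cons_cons]
              simp
          rw [hcons]
          have hih : PySem.Chars.join ['.']
              ((cs.takeWhile (fun c => !(c == '.'))) :: t.takeWhile (fun p => !PySem.Chars.isIn ['*'] p)) = gSpec cs := by
            rw [← ih, ht, List.takeWhile_cons, if_pos (by simp [hhead2])]
          rw [hih]
          by_cases hs : '*' ∈ cs
          · have hd : '.' ∈ cs.takeWhile (fun c => !(c == '*')) := by
              by_contra hnd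
              exact hp0 ((tw_mem_iff cs).mpr ⟨hs, hnd⟩)
            have h0 := cutOf_nonneg hd
            unfold gSpec
            rw [if_pos hs, if_pos (List.mem_cons_of_mem _ hs)]
            rw [List.takeWhile_cons, if_pos (by simp [hc2])]
            rw [cutOf_cons, if_pos hd]
            have : (1 + cutOf (cs.takeWhile (fun c => !(c == '*')))).toNat =
                (cutOf (cs.takeWhile (fun c => !(c == '*')))).toNat + 1 := by omega
            rw [this, List.take_succ_cons]
          · unfold gSpec
            rw [if_neg hs, if_neg (by simp [hs, Ne.symm hc2])]

lemma a_eq_gSpec (cs : List Char) : aLoop (cs.splitOn '.') [] = gSpec cs := by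
  rw [aLoop_spec, List.nil_append, h_eq]

-- ===== VERDICT (by name: the statement is the Claim_ definition above) =====
theorem get_smallest_specified_module_name_spec : Claim_equal_get_smallest_specified_module_name := by
  intro s _ _
  unfold Spec_get_smallest_specified_module_name get_smallest_specified_module_name get_smallest_specified_module_name_alt
  rw [splitOn_eq, a_eq_gSpec, b_eq_gSpec]
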